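-- pv_equiv track=rewrite | github.com/K0RNbread-Maf1a/Zero-Trust | core/risk_scorer.py | _categorize_threat
-- ===== SOURCE A (Python) =====
-- from typing import Dict, Any, List
--
-- def _categorize_threat(detected_patterns: List[str]) -> str:
--     """Categorize the type of threat based on detected patterns"""
--
--     # Priority-based categorization
--     if any(p in detected_patterns for p in ["model_extraction", "model_inversion"]):
--         return "ml_attack"
--     elif "sql_injection" in detected_patterns:
--         return "sql_injection"
--     elif "directory_traversal" in detected_patterns:
--         return "directory_traversal"
--     elif any(p in detected_patterns for p in ["timing_anomaly", "behavioral_anomaly"]):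
--         return "bot_activity"
--     elif "xss_attempt" in detected_patterns:
--         return "xss_attack"
--     elif "membership_inference" in detected_patterns:
--         return "ml_attack"
--     else:
--         return "general_suspicious"
-- ===== SOURCE B (Python) =====
-- from typing import List
--
-- _PRIORITY_TABLE = [
--     ("model_extraction", "ml_attack"),
--     ("model_inversion", "ml_attack"),
--     ("sql_injection", "sql_injection"),
--     ("directory_traversal", "directory_traversal"),
--     ("timing_anomaly", "bot_activity"),
--     ("behavioral_anomaly", "bot_activity"),
--     ("xss_attempt", "xss_attack"),
--     ("membership_inference", "ml_attack"),
-- ]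
-- _RANK = {p: (i, c) for i, (p, c) in enumerate(_PRIORITY_TABLE)}
--
-- def _categorize_threat(detected_patterns: List[str]) -> str:
--     """Single pass over the input, keeping the best (lowest-rank) match."""
--     best = None  # (rank, category) of the highest-priority pattern seen
--     for p in detected_patterns:
--         entry = _RANK.get(p)
--         if entry is not None and (best is None or entry[0] < best[0]):
--             best = entry
--     return best[1] if best is not None else "general_suspicious"
-- ===== Notes on version B (the rewrite author's own statement) =====
-- stated objective: alternative
-- what changed: Replaced the fixed chain of whole-list membership tests (one scan per rule) with a single pass over detected_patterns that looks each pattern up in a precomputed rank table and keeps the minimum-rank match.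
import Mathlib
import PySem

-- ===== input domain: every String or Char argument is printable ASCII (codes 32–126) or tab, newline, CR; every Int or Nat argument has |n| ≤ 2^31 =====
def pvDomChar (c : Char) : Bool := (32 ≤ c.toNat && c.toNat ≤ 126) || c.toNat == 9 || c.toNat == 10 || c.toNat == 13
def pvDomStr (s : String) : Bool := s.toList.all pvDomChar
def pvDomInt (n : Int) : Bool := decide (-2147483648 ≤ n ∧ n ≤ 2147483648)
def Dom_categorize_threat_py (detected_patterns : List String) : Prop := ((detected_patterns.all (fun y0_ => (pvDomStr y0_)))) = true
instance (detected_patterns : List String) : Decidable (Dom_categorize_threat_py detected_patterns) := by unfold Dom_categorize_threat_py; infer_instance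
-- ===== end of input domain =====

-- B replaces A's per-rule whole-list membership scans by one pass over the input
-- keeping the lowest-rank entry of a precomputed priority table (objective: alternative).

-- ===== PORT A =====
def categorize_threat_py (detected_patterns : List String) : String :=
  if ["model_extraction", "model_inversion"].any (fun p => decide (p ∈ detected_patterns)) then
    "ml_attack"
  else if "sql_injection" ∈ detected_patterns then
    "sql_injection"
  else if "directory_traversal" ∈ detected_patterns then
    "directory_traversal"
  else if ["timing_anomaly", "behavioral_anomaly"].any (fun p => decide (p ∈ detected_patterns)) then
    "bot_activity"
  else if "xss_attempt" ∈ detected_patterns then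
    "xss_attack"
  else if "membership_inference" ∈ detected_patterns then
    "ml_attack"
  else
    "general_suspicious"

-- ===== PORT B =====
-- _RANK = {p: (i, c) for i, (p, c) in enumerate(_PRIORITY_TABLE)}
def pvRankDict : PySem.Dict String (Int × String) :=
  PySem.Dict.ofList
    [("model_extraction", (0, "ml_attack")),
     ("model_inversion", (1, "ml_attack")),
     ("sql_injection", (2, "sql_injection")),
     ("directory_traversal", (3, "directory_traversal")),
     ("timing_anomaly", (4, "bot_activity")),
     ("behavioral_anomaly", (5, "bot_activity")),
     ("xss_attempt", (6, "xss_attack")),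
     ("membership_inference", (7, "ml_attack"))]

def pvStep (best : Option (Int × String)) (p : String) : Option (Int × String) :=
  match pvRankDict.get? p with
  | none => best
  | some entry =>
    match best with
    | none => some entry
    | some b => if entry.1 < b.1 then some entry else best

def categorize_threat_py_alt (detected_patterns : List String) : String :=
  match detected_patterns.foldl pvStep none with
  | some b => b.2
  | none => "general_suspicious"

-- ===== PRECONDITION & SPEC =====
def Spec_categorize_threat_py (detected_patterns : List String) (out : String) : Prop := out = categorize_threat_py_alt detected_patterns
instance (detected_patterns : List String) (out : String) : Decidable (Spec_categorize_threat_py detected_patterns out) := by unfold Spec_categorize_threat_py; infer_instance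

-- ===== CLAIM (what is proved, stated in full; the proofs are below) =====
def Claim_equal_categorize_threat_py : Prop := ∀ (detected_patterns : List String), Dom_categorize_threat_py detected_patterns → Spec_categorize_threat_py detected_patterns (categorize_threat_py detected_patterns)

-- ===== LEMMAS AND PROOFS =====

-- rank of a pattern in B's priority table, 8 for unknown patterns
def pvRank (p : String) : Int :=
  if p = "model_extraction" then 0
  else if p = "model_inversion" then 1
  else if p = "sql_injection" then 2
  else if p = "directory_traversal" then 3
  else if p = "timing_anomaly" then 4
  else if p = "behavioral_anomaly" then 5
  else if p = "xss_attempt" then 6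
  else if p = "membership_inference" then 7
  else 8

-- category belonging to each rank
def pvCat (r : Int) : String :=
  if r ≤ 1 then "ml_attack"
  else if r = 2 then "sql_injection"
  else if r = 3 then "directory_traversal"
  else if r ≤ 5 then "bot_activity"
  else if r = 6 then "xss_attack"
  else "ml_attack"

-- the i-th pattern of the table
def pvPat (i : Int) : String :=
  if i = 0 then "model_extraction"
  else if i = 1 then "model_inversion"
  else if i = 2 then "sql_injection"
  else if i = 3 then "directory_traversal"
  else if i = 4 then "timing_anomaly"
  else if i = 5 then "behavioral_anomaly"
  else if i = 6 then "xss_attempt"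
  else "membership_inference"

def pvEnc (r : Int) : Option (Int × String) :=
  if r = 8 then none else some (r, pvCat r)

lemma pvRank_bounds (p : String) : 0 ≤ pvRank p ∧ pvRank p ≤ 8 := by
  unfold pvRank; split_ifs <;> norm_num

lemma pvRank_lt8 (p : String) (h : pvRank p < 8) : p = pvPat (pvRank p) := by
  unfold pvRank at *
  split_ifs at * <;> simp_all [pvPat]

lemma pvRankDict_mk : pvRankDict = PySem.Dict.mk
    [("model_extraction", ((0 : Int), "ml_attack")),
     ("model_inversion", (1, "ml_attack")),
     ("sql_injection", (2, "sql_injection")),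
     ("directory_traversal", (3, "directory_traversal")),
     ("timing_anomaly", (4, "bot_activity")),
     ("behavioral_anomaly", (5, "bot_activity")),
     ("xss_attempt", (6, "xss_attack")),
     ("membership_inference", (7, "ml_attack"))] := by decide

lemma pvGet_eq (p : String) : pvRankDict.get? p = pvEnc (pvRank p) := by
  by_cases h0 : p = "model_extraction"
  · subst h0; decide
  by_cases h1 : p = "model_inversion"
  · subst h1; decide
  by_cases h2 : p = "sql_injection"
  · subst h2; decide
  by_cases h3 : p = "directory_traversal"
  · subst h3; decide
  by_cases h4 : p = "timing_anomaly"
  · subst h4; decide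
  by_cases h5 : p = "behavioral_anomaly"
  · subst h5; decide
  by_cases h6 : p = "xss_attempt"
  · subst h6; decide
  by_cases h7 : p = "membership_inference"
  · subst h7; decide
  rw [pvRankDict_mk]
  simp only [PySem.Dict.get?_mk_cons, beq_iff_eq]
  rw [if_neg (Ne.symm h0), if_neg (Ne.symm h1), if_neg (Ne.symm h2), if_neg (Ne.symm h3), if_neg (Ne.symm h4), if_neg (Ne.symm h5), if_neg (Ne.symm h6), if_neg (Ne.symm h7)]
  simp [PySem.Dict.get?, pvRank, pvEnc, h0, h1, h2, h3, h4, h5, h6, h7]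

lemma pvStep_enc (r : Int) (hr0 : 0 ≤ r) (hr8 : r ≤ 8) (p : String) :
    pvStep (pvEnc r) p = pvEnc (min r (pvRank p)) := by
  have hb := pvRank_bounds p
  unfold pvStep
  rw [pvGet_eq]
  unfold pvEnc
  by_cases h : pvRank p = 8
  · rw [show min r (pvRank p) = r from by omega, h]
    simp
  · by_cases hr : r = 8
    · rw [show min r (pvRank p) = pvRank p from by omega]
      subst hr; simp [h]
    · by_cases hlt : pvRank p < r
      · rw [show min r (pvRank p) = pvRank p from by omega]
        simp [h, hr, hlt]
      · rw [show min r (pvRank p) = r from by omega]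
        simp [h, hr, hlt]

def pvMinr (r : Int) (l : List String) : Int :=
  l.foldl (fun b p => min b (pvRank p)) r

lemma pvFold_enc (l : List String) : ∀ r : Int, 0 ≤ r → r ≤ 8 →
    l.foldl pvStep (pvEnc r) = pvEnc (pvMinr r l) := by
  induction l with
  | nil => intro r _ _; rfl
  | cons a t ih =>
    intro r hr0 hr8
    have hb := pvRank_bounds a
    have h : (a :: t).foldl pvStep (pvEnc r) = t.foldl pvStep (pvStep (pvEnc r) a) := rfl
    rw [h, pvStep_enc r hr0 hr8 a, ih (min r (pvRank a)) (by omega) (by omega)]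
    rfl

lemma pvAlt_eq (l : List String) :
    categorize_threat_py_alt l =
      (if pvMinr 8 l = 8 then "general_suspicious" else pvCat (pvMinr 8 l)) := by
  unfold categorize_threat_py_alt
  have h : (pvEnc 8 : Option (Int × String)) = none := rfl
  rw [← h, pvFold_enc l 8 (by norm_num) (by norm_num)]
  unfold pvEnc
  split_ifs <;> rfl

lemma pvMinr_bounds (l : List String) : ∀ r : Int, 0 ≤ r → r ≤ 8 →
    0 ≤ pvMinr r l ∧ pvMinr r l ≤ 8 := by
  induction l with
  | nil => intro r h0 h8; exact ⟨h0, h8⟩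
  | cons a t ih =>
    intro r h0 h8
    have hb := pvRank_bounds a
    exact ih (min r (pvRank a)) (by omega) (by omega)

lemma pvMinr_le_iff (l : List String) : ∀ r k : Int,
    (pvMinr r l ≤ k ↔ r ≤ k ∨ ∃ p ∈ l, pvRank p ≤ k) := by
  induction l with
  | nil => intro r k; simp [pvMinr]
  | cons a t ih =>
    intro r k
    have h : pvMinr r (a :: t) = pvMinr (min r (pvRank a)) t := rfl
    rw [h, ih]
    constructor
    · rintro (h1 | ⟨p, hp, hpk⟩)
      · by_cases hra : r ≤ k
        · exact Or.inl hra
        · exact Or.inr ⟨a, List.mem_cons_self .., by omega⟩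
      · exact Or.inr ⟨p, List.mem_cons_of_mem a hp, hpk⟩
    · rintro (h1 | ⟨p, hp, hpk⟩)
      · exact Or.inl (by omega)
      · rcases List.mem_cons.mp hp with h2 | h2
        · subst h2; exact Or.inl (by omega)
        · exact Or.inr ⟨p, h2, hpk⟩

lemma pvMinr_le_iff_pat (l : List String) (k : Int) (hk : k < 8) :
    pvMinr 8 l ≤ k ↔ ∃ i : Int, 0 ≤ i ∧ i ≤ k ∧ pvPat i ∈ l := by
  rw [pvMinr_le_iff]
  constructor
  · rintro (h | ⟨p, hp, hpk⟩)
    · omega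
    · have hb := pvRank_bounds p
      have h2 := pvRank_lt8 p (by omega)
      exact ⟨pvRank p, hb.1, hpk, h2 ▸ hp⟩
  · rintro ⟨i, hi0, hik, hmem⟩
    refine Or.inr ⟨pvPat i, hmem, ?_⟩
    have h3 : pvRank (pvPat i) ≤ i := by
      unfold pvPat
      split_ifs <;> simp_all [pvRank] <;> try omega
    omega

lemma pvPat_mem_minr (l : List String) (i : Int) (hi0 : 0 ≤ i) (hi8 : i < 8)
    (h : pvPat i ∈ l) : pvMinr 8 l ≤ i := by
  rw [pvMinr_le_iff_pat l i hi8]; exact ⟨i, hi0, le_refl i, h⟩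

lemma pvMem_of_minr_eq (l : List String) (k : Int) (h0 : 0 ≤ k) (h8 : k < 8)
    (hm : pvMinr 8 l = k) : pvPat k ∈ l := by
  have h1 : pvMinr 8 l ≤ k := by omega
  rw [pvMinr_le_iff_pat l k h8] at h1
  obtain ⟨i, hi0, hik, hmem⟩ := h1
  have h2 := pvPat_mem_minr l i hi0 (by omega) hmem
  have h3 : i = k := by omega
  subst h3; exact hmem

lemma pvNotMem_of_minr_gt (l : List String) (i : Int) (h0 : 0 ≤ i) (h8 : i < 8)
    (h : i < pvMinr 8 l) : pvPat i ∉ l :=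
  fun hin => absurd (pvPat_mem_minr l i h0 h8 hin) (by omega)

-- ===== VERDICT (by name: the statement is the Claim_ definition above) =====
theorem categorize_threat_py_spec : Claim_equal_categorize_threat_py := by
  intro l _
  unfold Spec_categorize_threat_py
  rw [pvAlt_eq]
  obtain ⟨hb0, hb8⟩ := pvMinr_bounds l 8 (by norm_num) (by norm_num)
  interval_cases hm : (pvMinr 8 l)
  case _ =>  -- pvMinr = 0
    have e0 := pvMem_of_minr_eq l 0 (by norm_num) (by norm_num) hm
    norm_num [pvPat] at e0
    norm_num [categorize_threat_py, pvCat, List.any_cons, List.any_nil, e0]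
  case _ =>  -- pvMinr = 1
    have n0 := pvNotMem_of_minr_gt l 0 (by norm_num) (by norm_num) (by omega)
    have e1 := pvMem_of_minr_eq l 1 (by norm_num) (by norm_num) hm
    norm_num [pvPat] at n0 e1
    norm_num [categorize_threat_py, pvCat, List.any_cons, List.any_nil, n0, e1]
  case _ =>  -- pvMinr = 2
    have n0 := pvNotMem_of_minr_gt l 0 (by norm_num) (by norm_num) (by omega)
    have n1 := pvNotMem_of_minr_gt l 1 (by norm_num) (by norm_num) (by omega)
    have e2 := pvMem_of_minr_eq l 2 (by norm_num) (by norm_num) hm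
    norm_num [pvPat] at n0 n1 e2
    norm_num [categorize_threat_py, pvCat, List.any_cons, List.any_nil, n0, n1, e2]
  case _ =>  -- pvMinr = 3
    have n0 := pvNotMem_of_minr_gt l 0 (by norm_num) (by norm_num) (by omega)
    have n1 := pvNotMem_of_minr_gt l 1 (by norm_num) (by norm_num) (by omega)
    have n2 := pvNotMem_of_minr_gt l 2 (by norm_num) (by norm_num) (by omega)
    have e3 := pvMem_of_minr_eq l 3 (by norm_num) (by norm_num) hm
    norm_num [pvPat] at n0 n1 n2 e3
    norm_num [categorize_threat_py, pvCat, List.any_cons, List.any_nil, n0, n1, n2, e3]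
  case _ =>  -- pvMinr = 4
    have n0 := pvNotMem_of_minr_gt l 0 (by norm_num) (by norm_num) (by omega)
    have n1 := pvNotMem_of_minr_gt l 1 (by norm_num) (by norm_num) (by omega)
    have n2 := pvNotMem_of_minr_gt l 2 (by norm_num) (by norm_num) (by omega)
    have n3 := pvNotMem_of_minr_gt l 3 (by norm_num) (by norm_num) (by omega)
    have e4 := pvMem_of_minr_eq l 4 (by norm_num) (by norm_num) hm
    norm_num [pvPat] at n0 n1 n2 n3 e4
    norm_num [categorize_threat_py, pvCat, List.any_cons, List.any_nil, n0, n1, n2, n3, e4]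
  case _ =>  -- pvMinr = 5
    have n0 := pvNotMem_of_minr_gt l 0 (by norm_num) (by norm_num) (by omega)
    have n1 := pvNotMem_of_minr_gt l 1 (by norm_num) (by norm_num) (by omega)
    have n2 := pvNotMem_of_minr_gt l 2 (by norm_num) (by norm_num) (by omega)
    have n3 := pvNotMem_of_minr_gt l 3 (by norm_num) (by norm_num) (by omega)
    have n4 := pvNotMem_of_minr_gt l 4 (by norm_num) (by norm_num) (by omega)
    have e5 := pvMem_of_minr_eq l 5 (by norm_num) (by norm_num) hm
    norm_num [pvPat] at n0 n1 n2 n3 n4 e5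
    norm_num [categorize_threat_py, pvCat, List.any_cons, List.any_nil, n0, n1, n2, n3, n4, e5]
  case _ =>  -- pvMinr = 6
    have n0 := pvNotMem_of_minr_gt l 0 (by norm_num) (by norm_num) (by omega)
    have n1 := pvNotMem_of_minr_gt l 1 (by norm_num) (by norm_num) (by omega)
    have n2 := pvNotMem_of_minr_gt l 2 (by norm_num) (by norm_num) (by omega)
    have n3 := pvNotMem_of_minr_gt l 3 (by norm_num) (by norm_num) (by omega)
    have n4 := pvNotMem_of_minr_gt l 4 (by norm_num) (by norm_num) (by omega)
    have n5 := pvNotMem_of_minr_gt l 5 (by norm_num) (by norm_num) (by omega)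
    have e6 := pvMem_of_minr_eq l 6 (by norm_num) (by norm_num) hm
    norm_num [pvPat] at n0 n1 n2 n3 n4 n5 e6
    norm_num [categorize_threat_py, pvCat, List.any_cons, List.any_nil, n0, n1, n2, n3, n4, n5, e6]
  case _ =>  -- pvMinr = 7
    have n0 := pvNotMem_of_minr_gt l 0 (by norm_num) (by norm_num) (by omega)
    have n1 := pvNotMem_of_minr_gt l 1 (by norm_num) (by norm_num) (by omega)
    have n2 := pvNotMem_of_minr_gt l 2 (by norm_num) (by norm_num) (by omega)
    have n3 := pvNotMem_of_minr_gt l 3 (by norm_num) (by norm_num) (by omega)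
    have n4 := pvNotMem_of_minr_gt l 4 (by norm_num) (by norm_num) (by omega)
    have n5 := pvNotMem_of_minr_gt l 5 (by norm_num) (by norm_num) (by omega)
    have n6 := pvNotMem_of_minr_gt l 6 (by norm_num) (by norm_num) (by omega)
    have e7 := pvMem_of_minr_eq l 7 (by norm_num) (by norm_num) hm
    norm_num [pvPat] at n0 n1 n2 n3 n4 n5 n6 e7
    norm_num [categorize_threat_py, pvCat, List.any_cons, List.any_nil, n0, n1, n2, n3, n4, n5, n6, e7]
  case _ =>  -- pvMinr = 8
    have n0 := pvNotMem_of_minr_gt l 0 (by norm_num) (by norm_num) (by omega)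
    have n1 := pvNotMem_of_minr_gt l 1 (by norm_num) (by norm_num) (by omega)
    have n2 := pvNotMem_of_minr_gt l 2 (by norm_num) (by norm_num) (by omega)
    have n3 := pvNotMem_of_minr_gt l 3 (by norm_num) (by norm_num) (by omega)
    have n4 := pvNotMem_of_minr_gt l 4 (by norm_num) (by norm_num) (by omega)
    have n5 := pvNotMem_of_minr_gt l 5 (by norm_num) (by norm_num) (by omega)
    have n6 := pvNotMem_of_minr_gt l 6 (by norm_num) (by norm_num) (by omega)
    have n7 := pvNotMem_of_minr_gt l 7 (by norm_num) (by norm_num) (by omega)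
    norm_num [pvPat] at n0 n1 n2 n3 n4 n5 n6 n7
    norm_num [categorize_threat_py, pvCat, List.any_cons, List.any_nil, n0, n1, n2, n3, n4, n5, n6, n7]
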